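-- pv_equiv track=rewrite | github.com/nox456/aerolineas-argentinas-proyecto | pagos_ventas/desarrollo_pv.py | cantidadReg
-- ===== SOURCE A (Python) =====
-- def cantidadReg(archivo):  # arreglo uni int
--     cant = [0, 0]  # int
--     if archivo != None:
--         for linea in archivo:
--             campos = linea.split("#")
--             cant[0] += 1
--             cant[1] = len(campos)
--     return cant
-- ===== SOURCE B (Python) =====
-- def cantidadReg(archivo):
--     if archivo != None:
--         lines = list(archivo)
--         if lines:
--             return [len(lines), len(lines[-1].split("#"))]
--     return [0, 0]
-- ===== Notes on version B (the rewrite author's own statement) =====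
-- stated objective: simpler
-- what changed: B materializes the lines and derives the result directly as [len(lines), len(last.split('#'))], splitting only the final line, instead of A's per-iteration accumulator that splits every line.
import Mathlib
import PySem

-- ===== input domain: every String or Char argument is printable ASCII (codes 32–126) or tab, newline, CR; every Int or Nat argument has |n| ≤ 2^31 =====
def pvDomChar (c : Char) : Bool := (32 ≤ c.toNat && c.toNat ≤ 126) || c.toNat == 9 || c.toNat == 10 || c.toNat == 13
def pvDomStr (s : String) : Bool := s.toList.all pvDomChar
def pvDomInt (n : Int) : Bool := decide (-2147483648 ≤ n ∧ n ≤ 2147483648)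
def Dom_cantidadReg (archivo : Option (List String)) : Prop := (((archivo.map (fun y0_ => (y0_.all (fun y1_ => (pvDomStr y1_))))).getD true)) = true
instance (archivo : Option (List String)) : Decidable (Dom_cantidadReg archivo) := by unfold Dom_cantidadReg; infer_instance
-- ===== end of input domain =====

-- B replaces A's per-line accumulator (which splits every line) by a direct
-- computation: the line count is the list length and the field count comes from
-- splitting only the last line (objective: simpler).

-- ===== PORT A =====
-- A: cant = [0,0]; if archivo != None: for linea in archivo: split, cant[0]+=1, cant[1]=len(campos)
def cantidadReg (archivo : Option (List String)) : List Int :=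
  let cant : Int × Int := (0, 0)
  let cant :=
    match archivo with
    | none => cant
    | some lines =>
        lines.foldl (fun cant linea =>
          let campos := (PySem.Str.split? linea "#").get!
          (cant.1 + 1, (campos.length : Int))) cant
  [cant.1, cant.2]

-- ===== PORT B =====
def cantidadReg_alt (archivo : Option (List String)) : List Int :=
  match archivo with
  | none => [0, 0]
  | some lines =>
      match lines with
      | [] => [0, 0]
      | _ :: _ =>
          [(lines.length : Int), (((PySem.Str.split? lines.getLast! "#").get!).length : Int)]

-- ===== PRECONDITION & SPEC =====
def Spec_cantidadReg (archivo : Option (List String)) (out : List Int) : Prop := out = cantidadReg_alt archivo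
instance (archivo : Option (List String)) (out : List Int) : Decidable (Spec_cantidadReg archivo out) := by unfold Spec_cantidadReg; infer_instance

-- ===== CLAIM (what is proved, stated in full; the proofs are below) =====
def Claim_equal_cantidadReg : Prop := ∀ (archivo : Option (List String)), Dom_cantidadReg archivo → Spec_cantidadReg archivo (cantidadReg archivo)

-- ===== LEMMAS AND PROOFS =====
theorem cantidadReg_fold (lines : List String) (c0 c1 : Int) (h : lines ≠ []) :
    lines.foldl (fun cant linea =>
      let campos := (PySem.Str.split? linea "#").get!
      (cant.1 + 1, (campos.length : Int))) (c0, c1)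
    = (c0 + lines.length, (((PySem.Str.split? lines.getLast! "#").get!).length : Int)) := by
  induction lines generalizing c0 c1 with
  | nil => exact absurd rfl h
  | cons x xs ih =>
      cases xs with
      | nil => simp [List.getLast!]
      | cons y ys =>
          rw [List.foldl_cons, ih _ _ (by simp)]
          have hlast : (x :: y :: ys).getLast! = (y :: ys).getLast! := by
            simp [List.getLast!, List.getLast]
          rw [hlast]
          simp
          ring

-- ===== VERDICT (by name: the statement is the Claim_ definition above) =====
theorem cantidadReg_spec : Claim_equal_cantidadReg := by
  intro archivo _
  unfold Spec_cantidadReg cantidadReg cantidadReg_alt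
  match archivo with
  | none => rfl
  | some [] => rfl
  | some (x :: xs) =>
      simp only []
      rw [cantidadReg_fold _ _ _ (by simp)]
      simp
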